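-- pv_equiv track=rewrite | github.com/Zjtep/jz_runescape_bots | core/RS.py | getLunarMagicMenuPosition
-- ===== SOURCE A (Python) =====
-- def getLunarMagicMenuPosition(win_coord):
--     item_size = [27, 29]
--     spacing = 2
--
--     item = []
--
--     x1 = win_coord[0]
--     y1 = win_coord[1]
--     x2 = win_coord[0] + item_size[0]
--     y2 = win_coord[1] + item_size[1]
--
--     for m in range(8):
--         for n in range(6):
--             # print n
--
--             item.append([x1, y1, x2, y2])
--
--             x1 += item_size[0]
--             x2 += item_size[0]
--             x1 += spacing
--             x2 += spacing
--         x1 = win_coord[0]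
--         x2 = win_coord[0] + item_size[0]
--         y1 += item_size[1]
--         y2 += item_size[1]
--
--     return item
-- ===== SOURCE B (Python) =====
-- def getLunarMagicMenuPosition(win_coord):
--     item_size = [27, 29]
--     spacing = 2
--     wx = win_coord[0]
--     wy = win_coord[1]
--     dx = item_size[0] + spacing   # 29: horizontal stride (spacing applies to x)
--     dy = item_size[1]             # 29: vertical stride (no spacing on y)
--     return [[wx + dx * n, wy + dy * m,
--              wx + item_size[0] + dx * n, wy + item_size[1] + dy * m]
--             for m in range(8) for n in range(6)]
-- ===== Notes on version B (the rewrite author's own statement) =====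
-- stated objective: simpler
-- what changed: Replaces the four mutable accumulators threaded/reset through the nested loops by a single comprehension computing each rectangle in closed form from its grid indices (wx+29n, wy+29m, ...).
import Mathlib
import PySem

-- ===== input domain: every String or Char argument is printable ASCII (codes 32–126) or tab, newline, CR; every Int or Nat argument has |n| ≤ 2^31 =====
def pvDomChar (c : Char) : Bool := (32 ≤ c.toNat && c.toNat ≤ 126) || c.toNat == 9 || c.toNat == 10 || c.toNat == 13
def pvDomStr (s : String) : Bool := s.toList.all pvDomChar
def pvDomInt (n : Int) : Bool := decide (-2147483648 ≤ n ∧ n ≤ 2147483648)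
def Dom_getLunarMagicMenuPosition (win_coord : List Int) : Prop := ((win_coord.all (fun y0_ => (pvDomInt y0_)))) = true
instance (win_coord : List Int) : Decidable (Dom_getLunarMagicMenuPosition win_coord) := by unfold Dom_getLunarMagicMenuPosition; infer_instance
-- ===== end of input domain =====

-- B replaces A's four mutable accumulators with a closed-form comprehension over the grid indices (simpler decomposition; same O(1) cost).


-- ===== PORT A =====
-- Literal port: nested folds over range(8)/range(6) threading the mutable state (item, x1, y1, x2, y2).
def getLunarMagicMenuPosition (win_coord : List Int) : List (List Int) :=
  let item_size : List Int := [27, 29]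
  let spacing : Int := 2
  let is0 := (PySem.List.pyGet? item_size 0).getD 0
  let is1 := (PySem.List.pyGet? item_size 1).getD 0
  let w0 := (PySem.List.pyGet? win_coord 0).getD 0   -- Pre_ guarantees the index is in range
  let w1 := (PySem.List.pyGet? win_coord 1).getD 0
  let st0 : List (List Int) × Int × Int × Int × Int := ([], w0, w1, w0 + is0, w1 + is1)
  let fin :=
    (PySem.List.pyRange 0 8 1).foldl (fun st _m =>
      let st' :=
        (PySem.List.pyRange 0 6 1).foldl (fun st _n =>
          let (item, x1, y1, x2, y2) := st
          let item := item ++ [[x1, y1, x2, y2]]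
          let x1 := x1 + is0
          let x2 := x2 + is0
          let x1 := x1 + spacing
          let x2 := x2 + spacing
          (item, x1, y1, x2, y2)) st
      let (item, _x1, y1, _x2, y2) := st'
      (item, w0, y1 + is1, w0 + is0, y2 + is1)) st0
  fin.1

-- ===== PORT B =====
-- Closed form: rectangle (m,n) is [wx + dx*n, wy + dy*m, wx + 27 + dx*n, wy + 29 + dy*m].
def getLunarMagicMenuPosition_alt (win_coord : List Int) : List (List Int) :=
  let item_size : List Int := [27, 29]
  let spacing : Int := 2
  let wx := (PySem.List.pyGet? win_coord 0).getD 0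
  let wy := (PySem.List.pyGet? win_coord 1).getD 0
  let is0 := (PySem.List.pyGet? item_size 0).getD 0
  let is1 := (PySem.List.pyGet? item_size 1).getD 0
  let dx := is0 + spacing
  let dy := is1
  (PySem.List.pyRange 0 8 1).flatMap (fun m =>
    (PySem.List.pyRange 0 6 1).map (fun n =>
      [wx + dx * n, wy + dy * m, wx + is0 + dx * n, wy + is1 + dy * m]))

-- ===== PRECONDITION & SPEC =====
-- Pre_ excludes only inputs on which A (and B) raise IndexError: fewer than two coordinates.
def Pre_getLunarMagicMenuPosition (win_coord : List Int) : Prop := 2 ≤ win_coord.length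
instance (win_coord : List Int) : Decidable (Pre_getLunarMagicMenuPosition win_coord) := by unfold Pre_getLunarMagicMenuPosition; infer_instance
def pvWitness_getLunarMagicMenuPosition : List Int := [10, 20]

def Spec_getLunarMagicMenuPosition (win_coord : List Int) (out : List (List Int)) : Prop := out = getLunarMagicMenuPosition_alt win_coord
instance (win_coord : List Int) (out : List (List Int)) : Decidable (Spec_getLunarMagicMenuPosition win_coord out) := by unfold Spec_getLunarMagicMenuPosition; infer_instance

-- ===== CLAIM (what is proved, stated in full; the proofs are below) =====
def Claim_equal_getLunarMagicMenuPosition : Prop := ∀ (win_coord : List Int), Dom_getLunarMagicMenuPosition win_coord → Pre_getLunarMagicMenuPosition win_coord → Spec_getLunarMagicMenuPosition win_coord (getLunarMagicMenuPosition win_coord)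

-- ===== LEMMAS AND PROOFS =====
theorem getLunarMagicMenuPosition_eq (win_coord : List Int) :
    getLunarMagicMenuPosition win_coord = getLunarMagicMenuPosition_alt win_coord := by
  simp only [getLunarMagicMenuPosition, getLunarMagicMenuPosition_alt]
  generalize ((PySem.List.pyGet? win_coord 0).getD 0) = wx
  generalize ((PySem.List.pyGet? win_coord 1).getD 0) = wy
  simp [PySem.List.pyRange, PySem.List.pyGet?, PySem.List.pyIdx?, List.range_succ]
  ring_nf
  norm_num

-- ===== VERDICT (by name: the statement is the Claim_ definition above) =====
theorem getLunarMagicMenuPosition_spec : Claim_equal_getLunarMagicMenuPosition := by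
  intro w _ _
  exact getLunarMagicMenuPosition_eq w
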